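-- pv_equiv track=rewrite | github.com/lucaslealvale/Coding-Interviews | words_dial/solution.py | get_valid_t9_words
-- ===== SOURCE A (Python) =====
-- T9_CHARS = {
--     '2': 'abc',
--     '3': 'def',
--     '4': 'ghi',
--     '5': 'jkl',
--     '6': 'mno',
--     '7': 'pqrs',
--     '8': 'tuv',
--     '9': 'wxyz',
-- }
--
-- def get_valid_t9_words(number, word_set):
--     results = []
--
--     def get_valid_words(number, prefix):
--         # If it's a complete word, print it.
--         if not number:
--             if prefix in word_set:
--                 results.append(prefix)
--             return
--
--         # Get characters that match this digit.
--         digit = number[0]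
--         letters = T9_CHARS.get(digit, '')
--
--         # Find in https://stackoverflow.com/questions/14617569/check-if-any-members-of-a-set-start-with-a-given-prefix-string-in-python
--         if(any(x.startswith(prefix) for x in word_set)):
--
--             # Go through all remaining options.
--             for letter in letters:
--                 get_valid_words(number[1:], prefix + letter)
--
--
--     get_valid_words(number, '')
--     return results
-- ===== SOURCE B (Python) =====
-- # B: encode each word to its T9 digit string with an inverted table and keep the matches, sorted.
-- _L2D = {
--     'a': '2', 'b': '2', 'c': '2',
--     'd': '3', 'e': '3', 'f': '3',
--     'g': '4', 'h': '4', 'i': '4',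
--     'j': '5', 'k': '5', 'l': '5',
--     'm': '6', 'n': '6', 'o': '6',
--     'p': '7', 'q': '7', 'r': '7', 's': '7',
--     't': '8', 'u': '8', 'v': '8',
--     'w': '9', 'x': '9', 'y': '9', 'z': '9',
-- }
--
-- def _encode(word):
--     digits = []
--     for c in word:
--         if c not in _L2D:
--             return None
--         digits.append(_L2D[c])
--     return ''.join(digits)
--
-- def get_valid_t9_words(number, word_set):
--     return sorted({w for w in word_set if _encode(w) == number})
-- ===== Notes on version B (the rewrite author's own statement) =====
-- stated objective: alternative
-- what changed: Instead of DFS-enumerating the letter expansions of the digit string and testing each against the word set, B encodes each word once to its T9 digit string with an inverted letter-to-digit table, keeps the words whose encoding equals number, and sorts them.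
import Mathlib
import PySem

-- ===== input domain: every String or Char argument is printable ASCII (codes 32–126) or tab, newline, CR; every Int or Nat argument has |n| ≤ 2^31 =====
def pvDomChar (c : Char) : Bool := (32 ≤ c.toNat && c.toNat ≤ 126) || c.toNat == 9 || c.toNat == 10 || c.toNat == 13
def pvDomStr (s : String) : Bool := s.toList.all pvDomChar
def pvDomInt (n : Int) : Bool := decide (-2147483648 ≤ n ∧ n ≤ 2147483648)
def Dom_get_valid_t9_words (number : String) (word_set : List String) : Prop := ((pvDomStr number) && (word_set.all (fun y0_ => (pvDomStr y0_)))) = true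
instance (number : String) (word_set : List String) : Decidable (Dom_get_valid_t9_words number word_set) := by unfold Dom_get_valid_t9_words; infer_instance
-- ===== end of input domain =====

-- ===== PORT A =====
-- B is a different algorithm (word encoding instead of DFS over letter expansions); the equivalence below is exact.
-- T9_CHARS, as a dict from one-character digit strings to their letter strings.
def pvT9 : PySem.Dict String String :=
  ⟨[("2", "abc"), ("3", "def"), ("4", "ghi"), ("5", "jkl"), ("6", "mno"), ("7", "pqrs"), ("8", "tuv"), ("9", "wxyz")]⟩

-- the letters for digit d: T9_CHARS.get(digit, '') with digit = the one-character string of d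
def pvLettersA (d : Char) : List Char := (pvT9.getD (String.ofList [d]) "").toList

-- the inner recursive get_valid_words(number, prefix): results is the accumulator res
def pvGoA (word_set : List String) : List Char → List Char → List String → List String
  | [], pre, res => if String.ofList pre ∈ word_set then res ++ [String.ofList pre] else res
  | d :: rest, pre, res =>
    if word_set.any (fun x => PySem.Str.startswith x (String.ofList pre)) then
      (pvLettersA d).foldl (fun r l => pvGoA word_set rest (pre ++ [l]) r) res
    else res

def get_valid_t9_words (number : String) (word_set : List String) : List String :=
  pvGoA word_set number.toList [] []

-- ===== PORT B =====
-- _L2D: the letter-to-digit table of Source B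
def pvL2D : PySem.Dict Char Char :=
  ⟨[('a','2'),('b','2'),('c','2'),('d','3'),('e','3'),('f','3'),('g','4'),('h','4'),('i','4'),
    ('j','5'),('k','5'),('l','5'),('m','6'),('n','6'),('o','6'),('p','7'),('q','7'),('r','7'),('s','7'),
    ('t','8'),('u','8'),('v','8'),('w','9'),('x','9'),('y','9'),('z','9')]⟩

-- _encode(word): loop over the characters, early None on a character outside the table, then ''.join
def pvEncode (word : String) : Option String :=
  (word.toList.foldl
      (fun acc c => acc.bind (fun digits =>
        match pvL2D.get? c with
        | none => none
        | some d => some (digits ++ [d])))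
      (some [])).map String.ofList

def get_valid_t9_words_alt (number : String) (word_set : List String) : List String :=
  PySem.List.sorted (PySem.Set.ofList (word_set.filter (fun w => pvEncode w == some number))) (fun x => x) false

-- ===== PRECONDITION & SPEC =====
def Spec_get_valid_t9_words (number : String) (word_set : List String) (out : List String) : Prop := out = get_valid_t9_words_alt number word_set
instance (number : String) (word_set : List String) (out : List String) : Decidable (Spec_get_valid_t9_words number word_set out) := by unfold Spec_get_valid_t9_words; infer_instance

-- ===== CLAIM (what is proved, stated in full; the proofs are below) =====
def Claim_equal_get_valid_t9_words : Prop := ∀ (number : String) (word_set : List String), Dom_get_valid_t9_words number word_set → Spec_get_valid_t9_words number word_set (get_valid_t9_words number word_set)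

-- ===== LEMMAS AND PROOFS =====

-- the DFS's candidate strings: every letter expansion of the digit list ns appended to pre, in DFS order
def pvExps : List Char → List Char → List String
  | [], pre => [String.ofList pre]
  | d :: rest, pre => (pvLettersA d).flatMap (fun l => pvExps rest (pre ++ [l]))

-- recursive form of B's encoder, on character lists
def pvEnc : List Char → Option (List Char)
  | [] => some []
  | c :: cs =>
    match pvL2D.get? c with
    | none => none
    | some d => (pvEnc cs).map (d :: ·)

theorem pvLetters_eq (d : Char) : pvLettersA d = if d = '2' then ['a','b','c'] else if d = '3' then ['d','e','f'] else if d = '4' then ['g','h','i'] else if d = '5' then ['j','k','l'] else if d = '6' then ['m','n','o'] else if d = '7' then ['p','q','r','s'] else if d = '8' then ['t','u','v'] else if d = '9' then ['w','x','y','z'] else [] := by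
  by_cases h2 : d = '2'; · subst h2; decide
  by_cases h3 : d = '3'; · subst h3; decide
  by_cases h4 : d = '4'; · subst h4; decide
  by_cases h5 : d = '5'; · subst h5; decide
  by_cases h6 : d = '6'; · subst h6; decide
  by_cases h7 : d = '7'; · subst h7; decide
  by_cases h8 : d = '8'; · subst h8; decide
  by_cases h9 : d = '9'; · subst h9; decide
  have hne : ∀ c : Char, d ≠ c → (String.ofList [c] == String.ofList [d]) = false := by
    intro c hc
    simp [String.ofList_inj]
    exact fun h => hc h.symm
  simp only [pvLettersA, pvT9, PySem.Dict.getD, PySem.Dict.get?, List.find?]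
  rw [show ("2":String) = String.ofList ['2'] from rfl, show ("3":String) = String.ofList ['3'] from rfl,
      show ("4":String) = String.ofList ['4'] from rfl, show ("5":String) = String.ofList ['5'] from rfl,
      show ("6":String) = String.ofList ['6'] from rfl, show ("7":String) = String.ofList ['7'] from rfl,
      show ("8":String) = String.ofList ['8'] from rfl, show ("9":String) = String.ofList ['9'] from rfl]
  simp [hne _ h2, hne _ h3, hne _ h4, hne _ h5, hne _ h6, hne _ h7, hne _ h8, hne _ h9, h2,h3,h4,h5,h6,h7,h8,h9]

-- the bridge between A's digit→letters table and B's letter→digit table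
theorem pvL2D_iff (l d : Char) : pvL2D.get? l = some d ↔ l ∈ pvLettersA d := by
  constructor
  · intro h
    simp only [PySem.Dict.get?, Option.map_eq_some_iff] at h
    obtain ⟨p, hfind, hp2⟩ := h
    have hmem := List.mem_of_find?_eq_some hfind
    have hbeq := List.find?_some hfind
    simp only [pvL2D, List.mem_cons, List.not_mem_nil, or_false] at hmem
    rcases hmem with rfl|rfl|rfl|rfl|rfl|rfl|rfl|rfl|rfl|rfl|rfl|rfl|rfl|rfl|rfl|rfl|rfl|rfl|rfl|rfl|rfl|rfl|rfl|rfl|rfl|rfl <;>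
      simp_all <;> subst hbeq <;> subst hp2 <;> decide
  · intro hm
    rw [pvLetters_eq] at hm
    split_ifs at hm with h2 h3 h4 h5 h6 h7 h8 h9 <;>
      simp only [List.mem_cons, List.not_mem_nil, or_false] at hm
    · rcases hm with rfl|rfl|rfl <;> subst h2 <;> decide
    · rcases hm with rfl|rfl|rfl <;> subst h3 <;> decide
    · rcases hm with rfl|rfl|rfl <;> subst h4 <;> decide
    · rcases hm with rfl|rfl|rfl <;> subst h5 <;> decide
    · rcases hm with rfl|rfl|rfl <;> subst h6 <;> decide
    · rcases hm with rfl|rfl|rfl|rfl <;> subst h7 <;> decide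
    · rcases hm with rfl|rfl|rfl <;> subst h8 <;> decide
    · rcases hm with rfl|rfl|rfl|rfl <;> subst h9 <;> decide

theorem pvLetters_pairwise (d : Char) : (pvLettersA d).Pairwise (· < ·) := by
  rw [pvLetters_eq]; split_ifs <;> decide

-- every candidate extends its prefix
theorem pvExps_shape (ns : List Char) : ∀ pre w, w ∈ pvExps ns pre → ∃ s, w = String.ofList (pre ++ s) := by
  induction ns with
  | nil =>
    intro pre w hw
    simp only [pvExps, List.mem_singleton] at hw
    exact ⟨[], by simp [hw]⟩
  | cons d rest ih =>
    intro pre w hw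
    simp only [pvExps, List.mem_flatMap] at hw
    obtain ⟨l, _, hw⟩ := hw
    obtain ⟨s, rfl⟩ := ih (pre ++ [l]) w hw
    exact ⟨l :: s, by simp⟩

-- membership in the DFS candidates = B's encoding relation
theorem pvExps_mem (ns : List Char) : ∀ pre w, w ∈ pvExps ns pre ↔ ∃ s, w = String.ofList (pre ++ s) ∧ pvEnc s = some ns := by
  induction ns with
  | nil =>
    intro pre w
    simp only [pvExps, List.mem_singleton]
    constructor
    · exact fun hw => ⟨[], by simp [hw], rfl⟩
    · rintro ⟨s, rfl, hs⟩
      cases s with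
      | nil => simp
      | cons c cs =>
        exfalso
        simp only [pvEnc] at hs
        cases h : pvL2D.get? c <;> rw [h] at hs <;> simp at hs
  | cons d rest ih =>
    intro pre w
    simp only [pvExps, List.mem_flatMap]
    constructor
    · rintro ⟨l, hl, hw⟩
      obtain ⟨s, rfl, hs⟩ := (ih (pre ++ [l]) w).mp hw
      refine ⟨l :: s, by simp, ?_⟩
      simp only [pvEnc, (pvL2D_iff l d).mpr hl, hs, Option.map_some]
    · rintro ⟨s, rfl, hs⟩
      cases s with
      | nil => simp [pvEnc] at hs
      | cons c cs =>
        simp only [pvEnc] at hs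
        cases h : pvL2D.get? c <;> rw [h] at hs
        · simp at hs
        · simp only [Option.map_eq_some_iff] at hs
          obtain ⟨ds, hds, heq⟩ := hs
          injection heq with h1 h2
          subst h1; subst h2
          exact ⟨c, (pvL2D_iff c _).mp h, (ih (pre ++ [c]) _).mpr ⟨cs, by simp, hds⟩⟩

-- lexicographic order is preserved by a common prefix
theorem pvLex_append (pre : List Char) (a b : List Char) (h : List.Lex (· < ·) a b) : List.Lex (· < ·) (pre ++ a) (pre ++ b) := by
  induction pre with
  | nil => exact h
  | cons c cs ih => exact List.Lex.cons ih

-- the DFS candidates come out in strictly increasing order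
theorem pvExps_pairwise (ns : List Char) : ∀ pre, (pvExps ns pre).Pairwise (· < ·) := by
  induction ns with
  | nil => intro pre; simp [pvExps]
  | cons d rest ih =>
    intro pre
    simp only [pvExps]
    rw [List.pairwise_flatMap]
    refine ⟨fun l _ => ih (pre ++ [l]), ?_⟩
    refine (pvLetters_pairwise d).imp_of_mem ?_
    intro l₁ l₂ _ _ hlt x hx y hy
    obtain ⟨s₁, rfl⟩ := pvExps_shape rest (pre ++ [l₁]) x hx
    obtain ⟨s₂, rfl⟩ := pvExps_shape rest (pre ++ [l₂]) y hy
    rw [String.lt_iff_toList_lt]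
    simp only [String.toList_ofList]
    have hlex : List.Lex (· < ·) (l₁ :: s₁) (l₂ :: s₂) := List.Lex.rel hlt
    exact (List.lt_iff_lex_lt _ _).mpr (by simpa [List.append_assoc] using pvLex_append pre (l₁ :: s₁) (l₂ :: s₂) hlex)

-- the DFS equals: filter the candidate list by membership in the word set
theorem pvGoA_spec (ws : List String) (ns : List Char) : ∀ pre res,
    pvGoA ws ns pre res = res ++ (pvExps ns pre).filter (fun w => decide (w ∈ ws)) := by
  induction ns with
  | nil =>
    intro pre res
    simp only [pvGoA, pvExps, List.filter]
    by_cases h : String.ofList pre ∈ ws <;> simp [h]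
  | cons d rest ih =>
    intro pre res
    simp only [pvGoA]
    by_cases h : ws.any (fun x => PySem.Str.startswith x (String.ofList pre))
    · rw [if_pos h]
      have hfun : (fun r l => pvGoA ws rest (pre ++ [l]) r)
          = (fun r l => r ++ (pvExps rest (pre ++ [l])).filter (fun w => decide (w ∈ ws))) := by
        funext r l; exact ih (pre ++ [l]) r
      rw [hfun, PySem.List.foldl_append_eq_flatMap]
      simp only [pvExps, List.filter_flatMap]
    · rw [if_neg h]
      have hnil : (pvExps (d :: rest) pre).filter (fun w => decide (w ∈ ws)) = [] := by
        rw [List.filter_eq_nil_iff]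
        intro w hw
        obtain ⟨s, rfl⟩ := pvExps_shape (d :: rest) pre w hw
        simp only [decide_eq_true_eq]
        intro hmem
        rw [Bool.not_eq_true, List.any_eq_false] at h
        have h2 := h _ hmem
        rw [PySem.Str.startswith_eq] at h2
        simp only [String.toList_ofList] at h2
        exact absurd ((PySem.Chars.startswith_iff _ _).mpr (List.prefix_append pre s)) (by simp [h2])
      rw [hnil, List.append_nil]

-- B's foldl encoder equals the recursive one
theorem pvEncode_foldl (cs : List Char) : ∀ acc,
    cs.foldl (fun acc c => acc.bind (fun digits =>
        match pvL2D.get? c with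
        | none => none
        | some d => some (digits ++ [d]))) (some acc)
      = (pvEnc cs).map (acc ++ ·) := by
  induction cs with
  | nil => intro acc; simp [pvEnc]
  | cons c cs ih =>
    intro acc
    simp only [List.foldl_cons, Option.bind_some, pvEnc]
    cases h : pvL2D.get? c
    · simp only []
      have : ∀ l : List Char, l.foldl (fun acc c => acc.bind (fun digits =>
          match pvL2D.get? c with
          | none => none
          | some d => some (digits ++ [d]))) none = none := by
        intro l; induction l with
        | nil => rfl
        | cons x xs ihx => simpa using ihx
      simp [this]
    · simp only []
      rw [ih]
      cases pvEnc cs <;> simp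

theorem pvEncode_eq (w : String) (number : String) :
    (pvEncode w == some number) = true ↔ pvEnc w.toList = some number.toList := by
  simp only [pvEncode, beq_iff_eq]
  rw [pvEncode_foldl w.toList []]
  cases h : pvEnc w.toList
  · simp
  · rename_i ds
    simp only [Option.map_some, List.nil_append, Option.some_inj]
    rw [show number = String.ofList number.toList by simp]
    rw [String.ofList_inj]
    simp

theorem pv_main (number : String) (word_set : List String) :
    get_valid_t9_words number word_set = get_valid_t9_words_alt number word_set := by
  unfold get_valid_t9_words get_valid_t9_words_alt
  rw [pvGoA_spec, List.nil_append]
  symm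
  apply PySem.List.sorted_eq_of_perm_of_pairwise_lt
  · rw [List.perm_ext_iff_of_nodup
      (((pvExps_pairwise number.toList []).imp ne_of_lt).filter _)
      (PySem.Set.nodup_ofList _)]
    intro a
    rw [List.mem_filter, PySem.Set.mem_ofList, List.mem_filter]
    constructor
    · rintro ⟨hexp, hmem⟩
      refine ⟨by simpa using hmem, ?_⟩
      obtain ⟨s, rfl, hs⟩ := (pvExps_mem number.toList [] a).mp hexp
      rw [pvEncode_eq]
      simpa [String.toList_ofList] using hs
    · rintro ⟨hmem, henc⟩
      refine ⟨?_, by simpa using hmem⟩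
      rw [pvEncode_eq] at henc
      exact (pvExps_mem number.toList [] a).mpr ⟨a.toList, by simp, henc⟩
  · exact (pvExps_pairwise number.toList []).filter _

-- ===== VERDICT (by name: the statement is the Claim_ definition above) =====
theorem get_valid_t9_words_spec : Claim_equal_get_valid_t9_words := by
  intro number word_set _
  unfold Spec_get_valid_t9_words
  exact pv_main number word_set
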